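-- pv_equiv track=rewrite | github.com/jsnider3/newbie-Java | Competitive/Python/hacklib.py | alphabet_score
-- ===== SOURCE A (Python) =====
-- def alphabet_score(word):
--   ''' Sum the difference between
--       each character + 1 and. '''
--   word = word.lower()
--   total = 0
--   for char in word:
--     val = ord(char) - ord('a') + 1
--     assert val > -1
--     total += val
--   return total
-- ===== SOURCE B (Python) =====
-- def alphabet_score(word):
--   '''Score = sum over distinct characters of count * alphabet position.'''
--   counts = {}
--   for char in word.lower():
--     counts[char] = counts.get(char, 0) + 1
--   for char in counts:
--     assert ord(char) > 95
--   return sum(n * (ord(char) - 96) for char, n in counts.items())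
-- ===== Notes on version B (the rewrite author's own statement) =====
-- stated objective: alternative
-- what changed: Replaces the per-character accumulate-and-assert loop by a two-stage grouping algorithm: build a frequency dictionary of the lowercased characters, then score each distinct character once, weighted by its count.
import Mathlib
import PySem

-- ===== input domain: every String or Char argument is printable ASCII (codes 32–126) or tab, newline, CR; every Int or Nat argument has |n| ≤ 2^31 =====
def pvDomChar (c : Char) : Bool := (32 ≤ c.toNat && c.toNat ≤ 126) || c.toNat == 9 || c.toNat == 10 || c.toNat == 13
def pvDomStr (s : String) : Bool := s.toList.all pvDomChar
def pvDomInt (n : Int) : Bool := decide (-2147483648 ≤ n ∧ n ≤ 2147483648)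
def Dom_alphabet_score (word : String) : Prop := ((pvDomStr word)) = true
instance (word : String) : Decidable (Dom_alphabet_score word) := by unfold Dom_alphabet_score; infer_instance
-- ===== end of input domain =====

-- B groups the lowercased word into a character-frequency dictionary and scores each
-- distinct character once, weighted by its count, instead of A's per-character loop
-- (objective: alternative decomposition, same cost).

-- ===== PORT A =====
-- for char in word: val = ord(char)-ord('a')+1; assert val > -1; total += val
-- (the assert never fails on inputs admitted by Pre_ below)
def alphabet_score (word : String) : Int :=
  let w := PySem.Str.lower word
  w.toList.foldl (fun total c => total + ((c.toNat : Int) - 97 + 1)) 0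

-- ===== PORT B =====
-- counts[char] = counts.get(char,0)+1 over word.lower(); then
-- sum(n * (ord(char)-96) for char, n in counts.items())
-- (the bulk 'assert ord(char) > 95' over the keys never fails on inputs admitted by Pre_ below)
def alphabet_score_alt (word : String) : Int :=
  let w := PySem.Str.lower word
  let counts : PySem.Dict Char Int :=
    w.toList.foldl (fun d c => d.insert c (d.getD c 0 + 1)) PySem.Dict.empty
  (counts.items.map (fun p => p.2 * ((p.1.toNat : Int) - 96))).sum

-- ===== PRECONDITION & SPEC =====
-- Pre_ excludes exactly the inputs on which the assert fails (AssertionError in both A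
-- and B): a character whose lowered code is < 96 (space, digits, most punctuation).
def Pre_alphabet_score (word : String) : Prop :=
  word.toList.all (fun c => decide (96 ≤ c.toNat) || (decide (65 ≤ c.toNat) && decide (c.toNat ≤ 90))) = true
instance (word : String) : Decidable (Pre_alphabet_score word) := by unfold Pre_alphabet_score; infer_instance
def pvWitness_alphabet_score : String := "Abc"

def Spec_alphabet_score (word : String) (out : Int) : Prop := out = alphabet_score_alt word
instance (word : String) (out : Int) : Decidable (Spec_alphabet_score word out) := by unfold Spec_alphabet_score; infer_instance

-- ===== CLAIM =====
def Claim_equal_alphabet_score : Prop := ∀ (word : String), Dom_alphabet_score word → Pre_alphabet_score word → Spec_alphabet_score word (alphabet_score word)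

-- ===== LEMMAS AND PROOFS =====

-- a fold that only adds is the sum of the mapped list
theorem foldl_add_map {α : Type} (f : α → Int) (l : List α) (a : Int) :
    l.foldl (fun t x => t + f x) a = a + (l.map f).sum := by
  induction l generalizing a with
  | nil => simp
  | cons c t ih => simp [List.foldl, ih]; ring

-- summing each distinct element's value weighted by its multiplicity equals summing over the list
theorem sum_dedup_count_mul (f : Char → Int) (l : List Char) :
    ((PySem.List.dedup l).map (fun k => (l.count k : Int) * f k)).sum = (l.map f).sum := by
  rw [← List.sum_toFinset _ (PySem.List.nodup_dedup l)]
  have htf : (PySem.List.dedup l).toFinset = l.toFinset := by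
    ext x; simp
  rw [htf, Finset.sum_list_map_count]
  simp

-- the whole equivalence at the list level
theorem grouped_fold_eq (l : List Char) :
    l.foldl (fun total c => total + ((c.toNat : Int) - 97 + 1)) 0
      = ((l.foldl (fun d c => d.insert c (d.getD c 0 + 1)) (PySem.Dict.empty : PySem.Dict Char Int)).items.map
          (fun p => p.2 * ((p.1.toNat : Int) - 96))).sum := by
  rw [PySem.Dict.foldl_insert_getD_add_one_eq_counter]
  rw [foldl_add_map]
  rw [PySem.Dict.items_counter]
  simp only [← PySem.List.dedup_eq_ofList, List.map_map, Function.comp_def]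
  rw [← sum_dedup_count_mul (fun c => (c.toNat : Int) - 97 + 1) l]
  simp only [zero_add]
  congr 1
  apply List.map_congr_left
  intro k _
  ring

-- ===== VERDICT =====
theorem alphabet_score_spec : Claim_equal_alphabet_score := by
  intro word _ _
  show alphabet_score word = alphabet_score_alt word
  exact grouped_fold_eq (PySem.Str.lower word).toList
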